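-- pv_equiv track=rewrite | github.com/iamrishap/PythonBits | InterviewBits/math/largest-coprime-divisor.py | cpFact
-- ===== SOURCE A (Python) =====
-- def cpFact(A, B):
--     while True:
--         A1 = A
--         B1 = B
--         # Find gcd
--         while B1 > 0:
--             A1, B1 = B1, A1 % B1
--         if A1 == 1:
--             return A
--         A = A // A1
--     return A
-- ===== SOURCE B (Python) =====
-- def _gcd(a, b):
--     while b > 0:
--         a, b = b, a % b
--     return a
--
--
-- def cpFact(A, B):
--     # Grow the full shared factor t by gcd-squaring (each step doubles the
--     # captured multiplicities), then strip it from A with a single division.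
--     t = _gcd(A, B)
--     while True:
--         t2 = _gcd(A, t * t)
--         if t2 == t:
--             break
--         t = t2
--     return A // t
-- ===== Notes on version B (the rewrite author's own statement) =====
-- stated objective: alternative
-- what changed: B never divides A inside the loop: it grows the full shared factor t to a fixpoint of t <- gcd(A, t*t) (each squaring step doubles the captured prime multiplicities) and then strips it with a single division A // t, instead of A's loop that repeatedly recomputes gcd(A, B) and divides A by it one layer at a time.
-- intended difference: For A < 0 with B <= 0 (where the hand-rolled Euclid loop returns the negative A itself) A returns 1, while B returns -1, which matches the sign A itself gives every other fully-shared negative input (e.g. cpFact(-4, 2) = -1), so B's value is the consistent one. — e.g. on cpFact(-6, -4): A returns 1, B returns -1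
import Mathlib
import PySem

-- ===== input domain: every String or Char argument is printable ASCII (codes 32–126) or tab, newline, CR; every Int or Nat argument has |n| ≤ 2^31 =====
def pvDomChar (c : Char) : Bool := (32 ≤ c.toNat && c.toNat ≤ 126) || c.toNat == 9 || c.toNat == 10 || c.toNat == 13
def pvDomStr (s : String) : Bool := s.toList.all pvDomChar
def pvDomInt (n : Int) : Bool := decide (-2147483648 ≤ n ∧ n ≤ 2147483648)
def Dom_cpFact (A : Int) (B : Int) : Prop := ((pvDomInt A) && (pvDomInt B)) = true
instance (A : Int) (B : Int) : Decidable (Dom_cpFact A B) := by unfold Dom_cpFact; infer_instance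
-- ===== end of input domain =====

-- B replaces A's "repeatedly divide A by a freshly recomputed gcd(A, B)" loop by growing the full
-- shared factor t to a fixpoint of t ← gcd(A, t*t) and stripping it with ONE final division
-- (objective: alternative — a different algorithm of similar cost; return value only, no mutation).

-- ===== PORT A =====
-- Both Pythons contain the *identical* hand-rolled Euclid loop (inline in A, helper `_gcd` in B);
-- it is ported once here and used by both ports.
def pyGcd (a b : Int) : Int :=
  if 0 < b then pyGcd b (PySem.Int.mod a b) else a
termination_by b.toNat
decreasing_by
  have hm2 := PySem.Int.mod_lt a (by assumption : 0 < b)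
  omega

-- A's outer while-True loop; the fuel argument is only a totality guard: wherever Python
-- terminates the loop runs fewer than |A| + 2 times, which cpFact hands it.
def cpFactLoop : Nat → Int → Int → Int
  | 0, _, A => A                 -- fuel exhausted: unreachable when fuel ≥ |A| + 2
  | fuel + 1, B, A =>
    let A1 := pyGcd A B
    if A1 = 1 then A
    else if A1 = 0 then A        -- Python raises ZeroDivisionError here (A = 0, B ≤ 0) — outside Pre_
    else if A = 0 then A         -- Python loops forever here (A = 0, B ≥ 2) — outside Pre_
    else cpFactLoop fuel B (PySem.Int.floordiv A A1)

def cpFact (A : Int) (B : Int) : Int := cpFactLoop (A.natAbs + 2) B A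

-- ===== PORT B =====
-- B's squaring loop; same fuel-as-totality-guard convention as above.
def cpAltLoop : Nat → Int → Int → Int
  | 0, A, t => PySem.Int.floordiv A t   -- fuel exhausted: unreachable when fuel ≥ |A| + 2
  | fuel + 1, A, t =>
    let t2 := pyGcd A (t * t)
    if t2 = t then PySem.Int.floordiv A t
    else cpAltLoop fuel A t2

def cpFact_alt (A : Int) (B : Int) : Int := cpAltLoop (A.natAbs + 2) A (pyGcd A B)

-- ===== PRECONDITION & SPEC =====
-- Pre_ excludes only A = 0 with B ≠ 1: there Python A (like Python B) returns no value — it raises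
-- ZeroDivisionError (B ≤ 0) or loops forever (B ≥ 2).
def Pre_cpFact (A : Int) (B : Int) : Prop := A ≠ 0 ∨ B = 1
instance (A : Int) (B : Int) : Decidable (Pre_cpFact A B) := by unfold Pre_cpFact; infer_instance

def pvWitness_cpFact : Int × Int := (12, 18)

-- For A < 0 with B ≤ 0 (where the hand-rolled Euclid loop returns the negative A itself) A returns 1,
-- while B returns -1, which matches the sign A itself gives every other fully-shared negative input
-- (e.g. cpFact(-4, 2) = -1), so B's value is the consistent one.
def D_cpFact (A : Int) (B : Int) : Prop := A < 0 ∧ B ≤ 0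
instance (A : Int) (B : Int) : Decidable (D_cpFact A B) := by unfold D_cpFact; infer_instance

def Spec_cpFact (A : Int) (B : Int) (out : Int) : Prop := ¬ D_cpFact A B → out = cpFact_alt A B
instance (A : Int) (B : Int) (out : Int) : Decidable (Spec_cpFact A B out) := by unfold Spec_cpFact; infer_instance

def pvDiffWitness_cpFact : Int × Int := (-6, -4)
def pvDiffWitnessOut_cpFact : Int × Int := (1, -1)

-- ===== CLAIM (what is proved, stated in full; the proofs are below) =====
def Claim_unchanged_cpFact : Prop := ∀ (A : Int) (B : Int), Dom_cpFact A B → Pre_cpFact A B → Spec_cpFact A B (cpFact A B)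
def Claim_changed_cpFact : Prop := Dom_cpFact (pvDiffWitness_cpFact.1) (pvDiffWitness_cpFact.2) ∧ Pre_cpFact (pvDiffWitness_cpFact.1) (pvDiffWitness_cpFact.2) ∧ D_cpFact (pvDiffWitness_cpFact.1) (pvDiffWitness_cpFact.2) ∧ cpFact (pvDiffWitness_cpFact.1) (pvDiffWitness_cpFact.2) = pvDiffWitnessOut_cpFact.1 ∧ cpFact_alt (pvDiffWitness_cpFact.1) (pvDiffWitness_cpFact.2) = pvDiffWitnessOut_cpFact.2 ∧ pvDiffWitnessOut_cpFact.1 ≠ pvDiffWitnessOut_cpFact.2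
def Claim_exact_cpFact : Prop := ∀ (A : Int) (B : Int), Dom_cpFact A B → Pre_cpFact A B → D_cpFact A B → cpFact A B ≠ cpFact_alt A B

-- ===== LEMMAS AND PROOFS =====

theorem cpFactLoop_succ (f : Nat) (B A : Int) : cpFactLoop (f + 1) B A =
    if pyGcd A B = 1 then A
    else if pyGcd A B = 0 then A
    else if A = 0 then A
    else cpFactLoop f B (PySem.Int.floordiv A (pyGcd A B)) := rfl

theorem cpAltLoop_succ (f : Nat) (A t : Int) : cpAltLoop (f + 1) A t =
    if pyGcd A (t * t) = t then PySem.Int.floordiv A t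
    else cpAltLoop f A (pyGcd A (t * t)) := rfl

theorem pyGcd_nonpos (a b : Int) (hb : ¬ 0 < b) : pyGcd a b = a := by
  rw [pyGcd]; simp [hb]

theorem pyGcd_pos (a b : Int) (hb : 0 < b) : pyGcd a b = (Int.gcd a b : Int) := by
  rw [pyGcd]
  simp only [hb, if_pos]
  rw [PySem.Int.mod_eq_emod_of_pos hb]
  by_cases hr : 0 < a % b
  · rw [pyGcd_pos b (a % b) hr]
    congr 1
    apply Nat.dvd_antisymm
    · apply Int.dvd_gcd
      · have h1 : (↑(Int.gcd b (a % b)) : Int) ∣ b := Int.gcd_dvd_left b (a % b)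
        have h2 : (↑(Int.gcd b (a % b)) : Int) ∣ a % b := Int.gcd_dvd_right b (a % b)
        have h3 : a % b + b * (a / b) = a := Int.emod_add_mul_ediv a b
        have h4 : (↑(Int.gcd b (a % b)) : Int) ∣ a % b + b * (a / b) :=
          dvd_add h2 (Dvd.dvd.mul_right h1 _)
        rwa [h3] at h4
      · exact Int.gcd_dvd_left b (a % b)
    · apply Int.dvd_gcd
      · exact Int.gcd_dvd_right a b
      · have h1 : (↑(Int.gcd a b) : Int) ∣ a := Int.gcd_dvd_left a b
        have h2 : (↑(Int.gcd a b) : Int) ∣ b := Int.gcd_dvd_right a b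
        have h3 : a % b = a - b * (a / b) := by have := Int.emod_add_mul_ediv a b; linarith
        rw [h3]
        exact dvd_sub h1 (Dvd.dvd.mul_right h2 _)
  · have hr0 : a % b = 0 := le_antisymm (by omega) (Int.emod_nonneg a (by omega))
    rw [hr0, pyGcd_nonpos b 0 (by omega)]
    have hdvd : b ∣ a := Int.dvd_of_emod_eq_zero hr0
    have hgb : Int.gcd a b = b.natAbs := by
      apply Nat.dvd_antisymm
      · apply Int.natCast_dvd_natCast.mp
        simpa using Int.gcd_dvd_right a b
      · apply Int.dvd_gcd
        · exact Int.natAbs_dvd.mpr hdvd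
        · exact Int.natAbs_dvd.mpr dvd_rfl
    rw [hgb, Int.natAbs_of_nonneg (by omega)]
termination_by b.toNat
decreasing_by
  have hm2 := Int.emod_lt_of_pos a hb
  omega

theorem pyGcd_one (x : Int) : pyGcd 1 x = 1 := by
  by_cases hx : 0 < x
  · rw [pyGcd_pos 1 x hx]
    norm_num [Int.gcd]
  · exact pyGcd_nonpos 1 x hx

theorem int_gcd_natAbs (a b : Int) : Int.gcd a b = Nat.gcd a.natAbs b.natAbs := rfl

theorem natCast_dvd_int (g : Nat) (a : Int) (h : g ∣ a.natAbs) : (g : Int) ∣ a :=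
  dvd_trans (Int.natCast_dvd_natCast.mpr h) (Int.natAbs_dvd.mpr dvd_rfl)

-- exact division: g ∣ A → (A // g) * g = A
theorem floordiv_exact (A g : Int) (hdvd : g ∣ A) :
    PySem.Int.floordiv A g * g = A := by
  have h1 := PySem.Int.floordiv_mul_add_mod A g
  have h2 : PySem.Int.mod A g = 0 := (PySem.Int.mod_eq_zero_iff_dvd A g).mpr hdvd
  omega

theorem floordiv_of_exact (A g q : Int) (hg : g ≠ 0) (h : q * g = A) :
    PySem.Int.floordiv A g = q := by
  have h1 := floordiv_exact A g ⟨q, by rw [← h]; ring⟩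
  exact mul_right_cancel₀ hg (h1.trans h.symm)

theorem floordiv_self_of_ne (A : Int) (hA : A ≠ 0) : PySem.Int.floordiv A A = 1 :=
  floordiv_of_exact A A 1 hA (one_mul A)

theorem floordiv_natAbs_pos (a : Int) (g : Nat) (ha : 0 < a) (hg : 0 < g) (h : g ∣ a.natAbs) :
    PySem.Int.floordiv a (g : Int) = ((a.natAbs / g : Nat) : Int) := by
  apply floordiv_of_exact _ _ _ (by exact_mod_cast (by omega : g ≠ 0))
  rw [← Nat.cast_mul, Nat.div_mul_cancel h]
  omega

theorem floordiv_natAbs_neg (a : Int) (g : Nat) (ha : a < 0) (hg : 0 < g) (h : g ∣ a.natAbs) :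
    PySem.Int.floordiv a (g : Int) = -((a.natAbs / g : Nat) : Int) := by
  apply floordiv_of_exact _ _ _ (by exact_mod_cast (by omega : g ≠ 0))
  rw [neg_mul, ← Nat.cast_mul, Nat.div_mul_cancel h]
  omega

-- "r is the B-coprime part of a": semantic characterisation both loops are proved to compute
def IsCop (a r B : Nat) : Prop := r ∣ a ∧ Nat.Coprime r B ∧ ∃ k, a / r ∣ B ^ k

theorem isCop_uniq (a B r r' : Nat) (ha : 0 < a)
    (h : IsCop a r B) (h' : IsCop a r' B) : r = r' := by
  obtain ⟨hd, hc, k, hk⟩ := h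
  obtain ⟨hd', hc', k', hk'⟩ := h'
  have step : ∀ (x y : Nat), x ∣ a → Nat.Coprime x B → y ∣ a → (∀ m, a / y ∣ B ^ m → x ∣ y) := by
    intro x y hx hxc hy m hm
    have hxy : Nat.Coprime x (a / y) :=
      Nat.Coprime.coprime_dvd_right hm (Nat.Coprime.pow_right m hxc)
    have hxa : x ∣ y * (a / y) := by rw [Nat.mul_div_cancel' hy]; exact hx
    exact (Nat.Coprime.dvd_of_dvd_mul_right hxy) hxa
  exact Nat.dvd_antisymm (step r r' hd hc hd' k' hk') (step r' r hd' hc' hd k hk)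

-- Nat reference of A's loop (same recursion, Nat arithmetic)
def aRef : Nat → Nat → Nat → Nat
  | 0, _, a => a
  | f + 1, B, a => if Nat.gcd a B = 1 then a else aRef f B (a / Nat.gcd a B)

-- Nat reference of B's loop
def bRef : Nat → Nat → Nat → Nat
  | 0, a, t => a / t
  | f + 1, a, t => if Nat.gcd a (t * t) = t then a / t else bRef f a (Nat.gcd a (t * t))

theorem aRef_spec (B : Nat) : ∀ (fuel a : Nat), 0 < a → a ≤ fuel → IsCop a (aRef fuel B a) B := by
  intro fuel
  induction fuel with
  | zero => intro a ha hle; omega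
  | succ f ih =>
    intro a ha hle
    rw [aRef]
    by_cases hg : Nat.gcd a B = 1
    · simp only [hg, if_pos]
      exact ⟨dvd_rfl, hg, 0, by simp [Nat.div_self ha]⟩
    · rw [if_neg hg]
      have hg0 : 0 < Nat.gcd a B := Nat.gcd_pos_of_pos_left B ha
      have hg2 : 2 ≤ Nat.gcd a B := by omega
      have hgd : Nat.gcd a B ∣ a := Nat.gcd_dvd_left a B
      have ha' : 0 < a / Nat.gcd a B := Nat.div_pos (Nat.le_of_dvd ha hgd) hg0
      have hlt : a / Nat.gcd a B < a := Nat.div_lt_self ha hg2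
      obtain ⟨hd, hc, k, hk⟩ := ih (a / Nat.gcd a B) ha' (by omega)
      refine ⟨hd.trans (Nat.div_dvd_of_dvd hgd), hc, k + 1, ?_⟩
      set r := aRef f B (a / Nat.gcd a B) with hr
      obtain ⟨c, hc2⟩ := hd
      have hr0 : 0 < r := by
        rcases Nat.eq_zero_or_pos r with h0 | h
        · rw [h0] at hc2; omega
        · exact h
      have hac : a = r * (c * Nat.gcd a B) := by
        conv_lhs => rw [← Nat.div_mul_cancel hgd, hc2]
        ring
      have hdivr : a / r = c * Nat.gcd a B := by
        conv_lhs => rw [hac]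
        rw [Nat.mul_div_cancel_left _ hr0]
      have hcval : a / Nat.gcd a B / r = c := by
        rw [hc2, Nat.mul_div_cancel_left _ hr0]
      rw [hdivr, pow_succ]
      exact mul_dvd_mul (hcval ▸ hk) (Nat.gcd_dvd_right a B)

theorem bRef_spec (B : Nat) : ∀ (fuel a t : Nat), 0 < a → 0 < t → t ∣ a →
    Nat.gcd a B ∣ t → (∃ k, t ∣ B ^ k) → a ≤ fuel + t → IsCop a (bRef fuel a t) B := by
  intro fuel
  induction fuel with
  | zero =>
    intro a t ha ht htd hgt hEk hle
    obtain ⟨k, hk⟩ := hEk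
    have hta : t ≤ a := Nat.le_of_dvd ha htd
    have hteq : t = a := by omega
    rw [bRef, hteq, Nat.div_self ha]
    rw [hteq] at hk
    exact ⟨one_dvd a, Nat.coprime_one_left B, k, by simpa using hk⟩
  | succ f ih =>
    intro a t ha ht htd hgt hEk hle
    obtain ⟨k, hk⟩ := hEk
    rw [bRef]
    have htt2 : t ∣ Nat.gcd a (t * t) := Nat.dvd_gcd htd (Dvd.intro t rfl)
    have ht2pos : 0 < Nat.gcd a (t * t) := Nat.gcd_pos_of_pos_left _ ha
    by_cases hfix : Nat.gcd a (t * t) = t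
    · rw [if_pos hfix]
      -- gcd (a/t) t = 1 from the fixpoint
      have hco : Nat.gcd (a / t) t = 1 := by
        have hd1 : Nat.gcd (a / t) t ∣ a / t := Nat.gcd_dvd_left _ _
        have hd2 : Nat.gcd (a / t) t ∣ t := Nat.gcd_dvd_right _ _
        have hdta : Nat.gcd (a / t) t * t ∣ a := by
          have h2 : Nat.gcd (a / t) t * t ∣ (a / t) * t := mul_dvd_mul_right hd1 t
          rwa [Nat.div_mul_cancel htd] at h2
        have hdtt : Nat.gcd (a / t) t * t ∣ t * t := mul_dvd_mul hd2 dvd_rfl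
        have hdt : Nat.gcd (a / t) t * t ∣ t := by
          have h3 := Nat.dvd_gcd hdta hdtt
          rwa [hfix] at h3
        obtain ⟨m, hm⟩ := hdt
        have hdm : Nat.gcd (a / t) t * m = 1 := by
          have hcalc : t * (Nat.gcd (a / t) t * m) = t * 1 := by
            rw [Nat.mul_one]
            calc t * (Nat.gcd (a / t) t * m) = Nat.gcd (a / t) t * t * m := by ring
              _ = t := hm.symm
          exact Nat.eq_of_mul_eq_mul_left ht hcalc
        exact Nat.dvd_one.mp ⟨m, hdm.symm⟩
      refine ⟨Nat.div_dvd_of_dvd htd, ?_, k, ?_⟩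
      · have hdB : Nat.gcd (a / t) B ∣ Nat.gcd (a / t) t := by
          apply Nat.dvd_gcd (Nat.gcd_dvd_left _ _)
          exact (Nat.dvd_gcd ((Nat.gcd_dvd_left _ _).trans (Nat.div_dvd_of_dvd htd))
            (Nat.gcd_dvd_right _ _)).trans hgt
        rw [hco] at hdB
        exact Nat.dvd_one.mp hdB
      · rw [Nat.div_div_self htd (by omega)]
        exact hk
    · rw [if_neg hfix]
      obtain ⟨m, hm⟩ := htt2
      have hm0 : m ≠ 0 := by
        rintro rfl
        rw [Nat.mul_zero] at hm
        omega
      have hm1 : m ≠ 1 := by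
        rintro rfl
        rw [Nat.mul_one] at hm
        exact hfix hm
      have h2t : t + 1 ≤ Nat.gcd a (t * t) := by
        have h2m : t * 2 ≤ t * m := Nat.mul_le_mul (Nat.le_refl t) (by omega)
        omega
      apply ih a (Nat.gcd a (t * t)) ha ht2pos (Nat.gcd_dvd_left _ _) (hgt.trans ⟨m, hm⟩)
      · exact ⟨k + k, (Nat.gcd_dvd_right _ _).trans (by rw [pow_add]; exact mul_dvd_mul hk hk)⟩
      · omega

theorem natMain (a B fa fb : Nat) (ha : 0 < a) (hfa : a ≤ fa) (hfb : a ≤ fb) :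
    aRef fa B a = bRef fb a (Nat.gcd a B) := by
  have hg0 : 0 < Nat.gcd a B := Nat.gcd_pos_of_pos_left B ha
  exact isCop_uniq a B _ _ ha (aRef_spec B fa a ha hfa)
    (bRef_spec B fb a (Nat.gcd a B) ha hg0 (Nat.gcd_dvd_left a B) dvd_rfl
      ⟨1, by simpa using Nat.gcd_dvd_right a B⟩ (by omega))

-- Bridge: A's Int loop to the Nat reference, positive A
theorem bridgeA_pos (B : Int) (hB : 0 < B) : ∀ (fuel : Nat) (a : Int), 0 < a →
    cpFactLoop fuel B a = ((aRef fuel B.natAbs a.natAbs : Nat) : Int) := by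
  intro fuel
  induction fuel with
  | zero => intro a ha; rw [cpFactLoop, aRef]; omega
  | succ f ih =>
    intro a ha
    rw [cpFactLoop_succ, aRef]
    have hgc : pyGcd a B = ((Nat.gcd a.natAbs B.natAbs : Nat) : Int) := by
      rw [pyGcd_pos a B hB, int_gcd_natAbs]
    have hg0 : 0 < Nat.gcd a.natAbs B.natAbs :=
      Nat.gcd_pos_of_pos_right _ (by omega : 0 < B.natAbs)
    by_cases h1 : Nat.gcd a.natAbs B.natAbs = 1
    · rw [if_pos (by rw [hgc, h1]; norm_num), if_pos h1]; omega
    · have hgdn : Nat.gcd a.natAbs B.natAbs ∣ a.natAbs := Nat.gcd_dvd_left _ _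
      rw [if_neg (by rw [hgc]; exact_mod_cast h1),
        if_neg (by rw [hgc]; exact_mod_cast (by omega : Nat.gcd a.natAbs B.natAbs ≠ 0)),
        if_neg (by omega : ¬ a = 0), if_neg h1, hgc,
        floordiv_natAbs_pos a _ ha hg0 hgdn]
      have hpos : 0 < a.natAbs / Nat.gcd a.natAbs B.natAbs :=
        Nat.div_pos (Nat.le_of_dvd (by omega) hgdn) hg0
      rw [ih _ (by exact_mod_cast hpos), Int.natAbs_natCast]

-- Bridge: A's Int loop, negative A
theorem bridgeA_neg (B : Int) (hB : 0 < B) : ∀ (fuel : Nat) (a : Int), a < 0 →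
    cpFactLoop fuel B a = -((aRef fuel B.natAbs a.natAbs : Nat) : Int) := by
  intro fuel
  induction fuel with
  | zero => intro a ha; rw [cpFactLoop, aRef]; omega
  | succ f ih =>
    intro a ha
    rw [cpFactLoop_succ, aRef]
    have hgc : pyGcd a B = ((Nat.gcd a.natAbs B.natAbs : Nat) : Int) := by
      rw [pyGcd_pos a B hB, int_gcd_natAbs]
    have hg0 : 0 < Nat.gcd a.natAbs B.natAbs :=
      Nat.gcd_pos_of_pos_right _ (by omega : 0 < B.natAbs)
    by_cases h1 : Nat.gcd a.natAbs B.natAbs = 1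
    · rw [if_pos (by rw [hgc, h1]; norm_num), if_pos h1]; omega
    · have hgdn : Nat.gcd a.natAbs B.natAbs ∣ a.natAbs := Nat.gcd_dvd_left _ _
      rw [if_neg (by rw [hgc]; exact_mod_cast h1),
        if_neg (by rw [hgc]; exact_mod_cast (by omega : Nat.gcd a.natAbs B.natAbs ≠ 0)),
        if_neg (by omega : ¬ a = 0), if_neg h1, hgc,
        floordiv_natAbs_neg a _ ha hg0 hgdn]
      have hpos : 0 < a.natAbs / Nat.gcd a.natAbs B.natAbs :=
        Nat.div_pos (Nat.le_of_dvd (by omega) hgdn) hg0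
      rw [ih _ (by omega : -((a.natAbs / Nat.gcd a.natAbs B.natAbs : Nat) : Int) < 0),
        Int.natAbs_neg, Int.natAbs_natCast]

-- Bridge: B's Int loop to the Nat reference, positive A (t stays positive and divides a)
theorem bridgeB_pos : ∀ (fuel : Nat) (a t : Int), 0 < a → 0 < t → t ∣ a →
    cpAltLoop fuel a t = ((bRef fuel a.natAbs t.natAbs : Nat) : Int) := by
  intro fuel
  induction fuel with
  | zero =>
    intro a t ha ht htd
    rw [cpAltLoop, bRef]
    have := floordiv_natAbs_pos a t.natAbs ha (by omega) (Int.natAbs_dvd_natAbs.mpr htd)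
    rwa [Int.natAbs_of_nonneg (by omega : (0:Int) ≤ t)] at this
  | succ f ih =>
    intro a t ha ht htd
    rw [cpAltLoop_succ, bRef]
    have htt : (0:Int) < t * t := mul_pos ht ht
    have hgc : pyGcd a (t * t) = ((Nat.gcd a.natAbs (t.natAbs * t.natAbs) : Nat) : Int) := by
      rw [pyGcd_pos a (t * t) htt, int_gcd_natAbs, Int.natAbs_mul]
    have hg0 : 0 < Nat.gcd a.natAbs (t.natAbs * t.natAbs) :=
      Nat.gcd_pos_of_pos_left _ (by omega : 0 < a.natAbs)
    by_cases hfix : Nat.gcd a.natAbs (t.natAbs * t.natAbs) = t.natAbs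
    · rw [if_pos (by rw [hgc, hfix]; omega), if_pos hfix]
      have := floordiv_natAbs_pos a t.natAbs ha (by omega) (Int.natAbs_dvd_natAbs.mpr htd)
      rwa [Int.natAbs_of_nonneg (by omega : (0:Int) ≤ t)] at this
    · rw [if_neg (by rw [hgc]; intro h; apply hfix; omega), if_neg hfix, hgc]
      have hgd : ((Nat.gcd a.natAbs (t.natAbs * t.natAbs) : Nat) : Int) ∣ a :=
        natCast_dvd_int _ a (Nat.gcd_dvd_left _ _)
      rw [ih a _ ha (by exact_mod_cast hg0) hgd, Int.natAbs_natCast]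

-- Bridge: B's Int loop, negative A (t stays positive and divides a, so // is exact)
theorem bridgeB_neg : ∀ (fuel : Nat) (a t : Int), a < 0 → 0 < t → t ∣ a →
    cpAltLoop fuel a t = -((bRef fuel a.natAbs t.natAbs : Nat) : Int) := by
  intro fuel
  induction fuel with
  | zero =>
    intro a t ha ht htd
    rw [cpAltLoop, bRef]
    have := floordiv_natAbs_neg a t.natAbs ha (by omega) (Int.natAbs_dvd_natAbs.mpr htd)
    rwa [Int.natAbs_of_nonneg (by omega : (0:Int) ≤ t)] at this
  | succ f ih =>
    intro a t ha ht htd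
    rw [cpAltLoop_succ, bRef]
    have htt : (0:Int) < t * t := mul_pos ht ht
    have hgc : pyGcd a (t * t) = ((Nat.gcd a.natAbs (t.natAbs * t.natAbs) : Nat) : Int) := by
      rw [pyGcd_pos a (t * t) htt, int_gcd_natAbs, Int.natAbs_mul]
    have hg0 : 0 < Nat.gcd a.natAbs (t.natAbs * t.natAbs) :=
      Nat.gcd_pos_of_pos_left _ (by omega : 0 < a.natAbs)
    by_cases hfix : Nat.gcd a.natAbs (t.natAbs * t.natAbs) = t.natAbs
    · rw [if_pos (by rw [hgc, hfix]; omega), if_pos hfix]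
      have := floordiv_natAbs_neg a t.natAbs ha (by omega) (Int.natAbs_dvd_natAbs.mpr htd)
      rwa [Int.natAbs_of_nonneg (by omega : (0:Int) ≤ t)] at this
    · rw [if_neg (by rw [hgc]; intro h; apply hfix; omega), if_neg hfix, hgc]
      have hgd : ((Nat.gcd a.natAbs (t.natAbs * t.natAbs) : Nat) : Int) ∣ a :=
        natCast_dvd_int _ a (Nat.gcd_dvd_left _ _)
      rw [ih a _ ha (by exact_mod_cast hg0) hgd, Int.natAbs_natCast]

-- A's loop returns 1 whenever A ≠ 0 and B ≤ 0 (two iterations)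
theorem cpFactLoop_nonposB (A B : Int) (hA : A ≠ 0) (hB : ¬ 0 < B)
    (fuel : Nat) (hf : 2 ≤ fuel) : cpFactLoop fuel B A = 1 := by
  obtain ⟨f, rfl⟩ : ∃ k, fuel = k + 2 := ⟨fuel - 2, by omega⟩
  have hg : pyGcd A B = A := pyGcd_nonpos A B hB
  by_cases hA1 : A = 1
  · rw [show f + 2 = (f + 1) + 1 by omega, cpFactLoop_succ, hg, hA1]; simp
  · rw [show f + 2 = (f + 1) + 1 by omega, cpFactLoop_succ, hg]
    rw [if_neg hA1, if_neg hA, if_neg hA, floordiv_self_of_ne A hA,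
      cpFactLoop_succ, pyGcd_one]
    simp

-- B's loop: positive A, B ≤ 0 → 1
theorem alt_nonposB_pos (A B : Int) (hA : 0 < A) (hB : ¬ 0 < B)
    (fuel : Nat) (hf : 1 ≤ fuel) : cpAltLoop fuel A (pyGcd A B) = 1 := by
  obtain ⟨f, rfl⟩ : ∃ k, fuel = k + 1 := ⟨fuel - 1, by omega⟩
  rw [pyGcd_nonpos A B hB, cpAltLoop_succ]
  have htt : (0:Int) < A * A := mul_pos hA hA
  have hgaa : pyGcd A (A * A) = A := by
    rw [pyGcd_pos A (A * A) htt, int_gcd_natAbs, Int.natAbs_mul,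
      Nat.gcd_eq_left (Dvd.intro A.natAbs rfl)]
    omega
  rw [if_pos hgaa]
  exact floordiv_self_of_ne A (by omega)

-- B's loop: negative A, B ≤ 0 → -1
theorem alt_nonposB_neg (A B : Int) (hA : A < 0) (hB : ¬ 0 < B)
    (fuel : Nat) (hf : 2 ≤ fuel) : cpAltLoop fuel A (pyGcd A B) = -1 := by
  obtain ⟨f, rfl⟩ : ∃ k, fuel = k + 2 := ⟨fuel - 2, by omega⟩
  rw [pyGcd_nonpos A B hB, show f + 2 = (f + 1) + 1 by omega, cpAltLoop_succ]
  have htt : (0:Int) < A * A := by nlinarith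
  have hgaa : pyGcd A (A * A) = ((A.natAbs : Nat) : Int) := by
    rw [pyGcd_pos A (A * A) htt, int_gcd_natAbs, Int.natAbs_mul,
      Nat.gcd_eq_left (Dvd.intro A.natAbs rfl)]
  rw [if_neg (by rw [hgaa]; omega), hgaa, cpAltLoop_succ]
  have hgaa2 : pyGcd A (((A.natAbs : Nat) : Int) * ((A.natAbs : Nat) : Int)) = ((A.natAbs : Nat) : Int) := by
    have hx : (0:Int) < ((A.natAbs : Nat) : Int) := by omega
    have htt2 : (0:Int) < ((A.natAbs : Nat) : Int) * ((A.natAbs : Nat) : Int) := mul_pos hx hx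
    rw [pyGcd_pos _ _ htt2, int_gcd_natAbs, Int.natAbs_mul, Int.natAbs_natCast,
      Nat.gcd_eq_left (Dvd.intro A.natAbs rfl)]
  rw [if_pos hgaa2]
  exact floordiv_of_exact _ _ _ (by omega) (by omega)

-- the equal case assembled on Int
theorem main_eq (A B : Int) (hpre : A ≠ 0 ∨ B = 1) (hnd : ¬ (A < 0 ∧ B ≤ 0)) :
    cpFact A B = cpFact_alt A B := by
  unfold cpFact cpFact_alt
  rcases lt_trichotomy A 0 with hA | hA | hA
  · -- A < 0, so B > 0 by hnd
    have hB : 0 < B := by omega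
    have hgpos : 0 < Nat.gcd A.natAbs B.natAbs :=
      Nat.gcd_pos_of_pos_left _ (by omega : 0 < A.natAbs)
    rw [bridgeA_neg B hB _ A hA, pyGcd_pos A B hB, int_gcd_natAbs,
      bridgeB_neg _ A _ hA (by exact_mod_cast hgpos)
        (natCast_dvd_int _ A (Nat.gcd_dvd_left _ _)),
      Int.natAbs_natCast,
      natMain A.natAbs B.natAbs (A.natAbs + 2) (A.natAbs + 2) (by omega) (by omega) (by omega)]
  · -- A = 0, so B = 1
    subst hA
    have hB : B = 1 := by tauto
    subst hB
    have h01 : pyGcd 0 1 = 1 := by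
      rw [pyGcd_pos 0 1 one_pos]
      norm_num [int_gcd_natAbs]
    have h011 : pyGcd 0 (1 * 1) = 1 := by rw [one_mul]; exact h01
    show cpFactLoop (0 + 2) 1 0 = cpAltLoop (0 + 2) 0 (pyGcd 0 1)
    rw [show (0 + 2 : Nat) = 1 + 1 by omega, cpFactLoop_succ, h01, if_pos rfl,
      cpAltLoop_succ, h011, if_pos rfl,
      floordiv_of_exact 0 1 0 one_ne_zero (by ring)]
  · -- A > 0
    by_cases hB : 0 < B
    · have hgpos : 0 < Nat.gcd A.natAbs B.natAbs :=
        Nat.gcd_pos_of_pos_left _ (by omega : 0 < A.natAbs)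
      rw [bridgeA_pos B hB _ A hA, pyGcd_pos A B hB, int_gcd_natAbs,
        bridgeB_pos _ A _ hA (by exact_mod_cast hgpos)
          (natCast_dvd_int _ A (Nat.gcd_dvd_left _ _)),
        Int.natAbs_natCast,
        natMain A.natAbs B.natAbs (A.natAbs + 2) (A.natAbs + 2) (by omega) (by omega) (by omega)]
    · rw [cpFactLoop_nonposB A B (by omega) hB _ (by omega),
        alt_nonposB_pos A B hA hB _ (by omega)]

-- ===== VERDICT (by name: the statements are the Claim_ definitions above) =====
theorem cpFact_spec : Claim_unchanged_cpFact := by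
  intro A B _ hpre hnd
  unfold Pre_cpFact at hpre
  unfold D_cpFact at hnd
  exact main_eq A B hpre hnd

theorem cpFact_changed : Claim_changed_cpFact := by
  unfold Claim_changed_cpFact
  refine ⟨by decide, by unfold Pre_cpFact pvDiffWitness_cpFact; norm_num,
    by unfold D_cpFact pvDiffWitness_cpFact; norm_num, ?_, ?_, by decide⟩
  · exact cpFactLoop_nonposB (-6) (-4) (by norm_num) (by norm_num) _ (by norm_num)
  · exact alt_nonposB_neg (-6) (-4) (by norm_num) (by norm_num) _ (by norm_num)

theorem cpFact_tight : Claim_exact_cpFact := by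
  intro A B _ hpre hd
  obtain ⟨hA, hB⟩ := hd
  unfold cpFact cpFact_alt
  rw [cpFactLoop_nonposB A B (by omega) (by omega) _ (by omega),
    alt_nonposB_neg A B hA (by omega) _ (by omega)]
  norm_num
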